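-- pv_equiv track=rewrite | github.com/prepsure/python_calculator | JaranStuff/Arithmetic.py | quotient
-- ===== SOURCE A (Python) =====
-- def quotient(a,b):
--   if type(a+b)!=int:
--     return None
--   liste=[]
--   while b!=0:
--     liste.append(a//b)
--     a,b=b,a%b
--   return liste
-- ===== SOURCE B (Python) =====
-- def quotient(a, b):
--   if type(a+b) != int:
--     return None
--   rem = [a, b]
--   while rem[-1] != 0:
--     rem.append(rem[-2] % rem[-1])
--   return [x // y for x, y in zip(rem[:-2], rem[1:])]
-- ===== Notes on version B (the rewrite author's own statement) =====
-- stated objective: alternative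
-- what changed: Instead of A's single while loop that accumulates quotients as it goes, B runs two staged passes: first it materialises the whole Euclidean remainder chain [a, b, a%b, ...] in a list, then it produces the quotients as pairwise floor-divisions of adjacent remainders via zip.
import Mathlib
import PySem

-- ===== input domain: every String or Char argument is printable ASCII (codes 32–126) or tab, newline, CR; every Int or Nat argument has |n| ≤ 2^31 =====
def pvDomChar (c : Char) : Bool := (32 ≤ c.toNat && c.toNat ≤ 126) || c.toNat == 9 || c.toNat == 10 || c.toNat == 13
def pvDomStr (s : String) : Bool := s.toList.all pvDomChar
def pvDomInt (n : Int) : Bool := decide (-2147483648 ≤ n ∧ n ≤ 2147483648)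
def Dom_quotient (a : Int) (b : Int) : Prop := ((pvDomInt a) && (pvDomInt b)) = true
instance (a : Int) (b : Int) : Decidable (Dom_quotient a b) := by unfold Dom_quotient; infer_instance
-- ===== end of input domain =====

-- B replaces A's quotient-accumulating while loop by two staged passes: first build the
-- full Euclidean remainder chain, then take pairwise floor-divisions of adjacent
-- remainders (objective: alternative, same cost).
-- Both ports terminate because |a % b| < |b| for b ≠ 0 (Python mod takes the divisor's sign).
theorem pvModNatAbs_lt (a b : Int) (hb : b ≠ 0) :
    (PySem.Int.mod a b).natAbs < b.natAbs := by
  rcases lt_or_gt_of_ne hb with h | h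
  · have := PySem.Int.mod_neg_bounds a h
    omega
  · have h1 := PySem.Int.mod_nonneg a h
    have h2 := PySem.Int.mod_lt a h
    omega

-- ===== PORT A =====
-- the Python guard 'type(a+b)!=int' is always false on Int inputs; it is ported as the never-taken None branch
def quotientLoop (a : Int) (b : Int) (liste : List Int) : List Int :=
  if hb : b ≠ 0 then
    quotientLoop b (PySem.Int.mod a b) (liste ++ [PySem.Int.floordiv a b])
  else
    liste
termination_by b.natAbs
decreasing_by exact pvModNatAbs_lt a b hb

def quotient (a : Int) (b : Int) : Option (List Int) :=
  if False then none else some (quotientLoop a b [])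

-- ===== PORT B =====
-- the remainder-chain while loop: its state is the last two elements of `rem`,
-- and each iteration appends rem[-2] % rem[-1]
def remTail (x : Int) (y : Int) : List Int :=
  if hy : y = 0 then []
  else PySem.Int.mod x y :: remTail y (PySem.Int.mod x y)
termination_by y.natAbs
decreasing_by exact pvModNatAbs_lt x y hy

def quotient_alt (a : Int) (b : Int) : Option (List Int) :=
  if False then none else
    let rem : List Int := a :: b :: remTail a b
    some (List.zipWith (fun x y => PySem.Int.floordiv x y)
      (PySem.List.slice rem none (some (-2)))   -- rem[:-2]
      (PySem.List.slice rem (some 1) none))     -- rem[1:]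

-- ===== PRECONDITION & SPEC =====
def Spec_quotient (a : Int) (b : Int) (out : Option (List Int)) : Prop := out = quotient_alt a b
instance (a : Int) (b : Int) (out : Option (List Int)) : Decidable (Spec_quotient a b out) := by unfold Spec_quotient; infer_instance

-- ===== CLAIM (what is proved, stated in full; the proofs are below) =====
def Claim_equal_quotient : Prop := ∀ (a : Int) (b : Int), Dom_quotient a b → Spec_quotient a b (quotient a b)

-- ===== LEMMAS AND PROOFS =====
-- reference form: the continued-fraction list as a plain recursion
def cfRec (a : Int) (b : Int) : List Int :=
  if hb : b = 0 then []
  else PySem.Int.floordiv a b :: cfRec b (PySem.Int.mod a b)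
termination_by b.natAbs
decreasing_by exact pvModNatAbs_lt a b hb

theorem quotientLoop_eq (a b : Int) (acc : List Int) :
    quotientLoop a b acc = acc ++ cfRec a b := by
  by_cases hb : b = 0
  · rw [quotientLoop, cfRec]; simp [hb]
  · rw [quotientLoop, cfRec]
    simp only [hb, dite_false, ne_eq, not_false_iff, dite_true]
    rw [quotientLoop_eq b (PySem.Int.mod a b)]
    simp
termination_by b.natAbs
decreasing_by exact pvModNatAbs_lt a b hb

theorem zip_remTail_eq (a b : Int) :
    List.zipWith (fun x y => PySem.Int.floordiv x y)
      ((a :: b :: remTail a b).take ((a :: b :: remTail a b).length - 2))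
      (b :: remTail a b) = cfRec a b := by
  by_cases hb : b = 0
  · rw [remTail, cfRec]; simp [hb]
  · rw [remTail, cfRec]
    simp only [hb, dite_false]
    have ih := zip_remTail_eq b (PySem.Int.mod a b)
    set m := PySem.Int.mod a b with hm
    set T := remTail b m with hT
    have hlen : (a :: b :: m :: T).length - 2 = T.length + 1 := by
      simp
    have hlen2 : (b :: m :: T).length - 2 = T.length := by
      simp
    rw [hlen, List.take_succ_cons, List.zipWith_cons_cons, ← hlen2, ih]
termination_by b.natAbs
decreasing_by exact pvModNatAbs_lt a b hb

-- ===== VERDICT (by name: the statement is the Claim_ definition above) =====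
theorem quotient_spec : Claim_equal_quotient := by
  intro a b _
  unfold Spec_quotient quotient quotient_alt
  simp only [if_false]
  rw [PySem.List.slice_to_neg_ofNat _ 2 (by omega), PySem.List.slice_from_one]
  simp only [List.tail_cons]
  rw [quotientLoop_eq, zip_remTail_eq]
  simp
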